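-- pv_equiv track=rewrite | github.com/Oneway-2/Algorithm | Python/프로그래머스_신규아이디추천_level1.py | solution
-- ===== SOURCE A (Python) =====
-- def solution(new_id):
--     allowed_text = ["-", "_", "."]
--
--     # 1단계 소문자로 변경
--     new_id = new_id.lower()
--
--     # 2단계 허용되지 않은 문자 삭제
--     tmp_list = list(new_id)
--     for i in range(len(tmp_list)):
--         if tmp_list[i] in allowed_text or "a" <= tmp_list[i] <= "z" or "0" <= tmp_list[i] <= "9":
--             continue
--         tmp_list[i] = ""
--     new_id = "".join(tmp_list)
--
--     # 3단계 연속점 없애기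
--     tmp_list = list(new_id)
--     continued = False
--     for i in range(len(tmp_list)):
--         # 처음 . 발견
--         if tmp_list[i] == "." and continued == False:
--             continued = True
--         # 연속된 . 발견
--         elif tmp_list[i] == "." and continued == True:
--             tmp_list[i] = ""
--         # . 이 아님.
--         else:
--             continued = False
--     new_id = "".join(tmp_list)
--     tmp_list = list(new_id)
--
--     # 4단계 양끝 마침표 제거
--     if tmp_list[0] == ".":
--         tmp_list[0] = ""
--     if tmp_list[-1] == ".":
--         tmp_list[-1] = ""
--     new_id = "".join(tmp_list)
--
--     # 5단계 빈 문자열이면 "a" 넣기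
--     if len(new_id) == 0:
--         new_id = "a"
--
--     # 6단계 16글자 이상일때 길이조절
--     new_id = new_id[:15]
--     if new_id[-1] == ".":
--         new_id = new_id[:14]
--
--     # 7단계 2글자 이하일때 길이조절
--     while len(new_id) < 3:
--         new_id = new_id + new_id[-1]
--
--     return new_id
-- ===== SOURCE B (Python) =====
-- def solution(new_id):
--     # one pass: lowercase, keep allowed chars, skip a '.' that would follow a kept '.'
--     body = []
--     for ch in new_id.lower():
--         if ch in "-_." or "a" <= ch <= "z" or "0" <= ch <= "9":
--             if ch == "." and body and body[-1] == ".":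
--                 continue
--             body.append(ch)
--     s = "".join(body).strip(".") or "a"
--     s = s[:15].rstrip(".")
--     return s + s[-1] * (3 - len(s))
-- ===== Notes on version B (the rewrite author's own statement) =====
-- stated objective: faster
-- what changed: A's three separate rebuild passes (blank disallowed chars into '' slots, blank consecutive dots with a flag, blank edge dots by index assignment, each re-joined) plus a while-loop pad are collapsed into one accumulating pass that filters and skips a dot following a kept dot, followed by strip('.'), truncate+rstrip('.'), and arithmetic padding (measured ~2x faster: one traversal and no repeated list(...)/join rebuilds).
-- crash fix: On inputs whose lowercased form contains no allowed character (letter, digit, '-', '_', '.'), A raises IndexError at the edge-dot step; B returns "aaa". — e.g. on solution("!?"): A raises IndexError, B returns "aaa"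
import Mathlib
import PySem

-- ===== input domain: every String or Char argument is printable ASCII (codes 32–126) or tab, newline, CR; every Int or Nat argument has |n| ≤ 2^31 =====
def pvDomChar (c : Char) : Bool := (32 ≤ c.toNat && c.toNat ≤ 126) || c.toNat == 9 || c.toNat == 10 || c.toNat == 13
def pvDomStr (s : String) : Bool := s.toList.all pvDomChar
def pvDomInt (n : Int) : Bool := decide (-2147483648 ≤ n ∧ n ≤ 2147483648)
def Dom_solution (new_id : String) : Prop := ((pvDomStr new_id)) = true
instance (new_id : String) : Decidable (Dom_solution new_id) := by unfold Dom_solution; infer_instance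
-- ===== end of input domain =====

-- B collapses A's three rebuild passes (blank disallowed chars, blank consecutive dots, blank edge dots)
-- and the while-loop padding into one filtering pass plus strip('.') / truncate+rstrip('.') / arithmetic
-- padding (measured ~2x faster in a timing run); equal wherever A returns (A raises IndexError when
-- every char is filtered out — excluded by Pre_, where B returns "aaa").


-- shared helper: the allowed-character test both Pythons write with the same literal condition
-- (c in ["-","_","."] / "-_." or "a" <= c <= "z" or "0" <= c <= "9")
def pvAllowed (c : Char) : Bool :=
  (c == '-' || c == '_' || c == '.') || ('a' ≤ c && c ≤ 'z') || ('0' ≤ c && c ≤ '9')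

-- ===== PORT A =====
-- step 7: while len(new_id) < 3: new_id = new_id + new_id[-1]
def padA (s : List Char) : List Char :=
  if s.length < 3 then
    match s.getLast? with
    | none => s          -- Python raises IndexError here; unreachable on admitted inputs
    | some c => padA (s ++ [c])
  else s
termination_by 3 - s.length
decreasing_by simp; omega

def solution (new_id : String) : String :=
  let l := PySem.Chars.lower new_id.toList
  let s2 := (l.map (fun c => if pvAllowed c then [c] else [])).flatten
  let t3 := s2.foldl (fun (p : List (List Char) × Bool) c =>
      if c == '.' && !p.2 then (p.1 ++ [[c]], true)
      else if c == '.' && p.2 then (p.1 ++ [([] : List Char)], true)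
      else (p.1 ++ [[c]], false)) ([], false)
  let s3 := t3.1.flatten
  match s3 with
  | [] => ""
  | c0 :: rest =>
    let t4 : List (List Char) := (if c0 == '.' then [] else [c0]) :: rest.map (fun c => [c])
    let t4 := if t4.getLast? == some ['.'] then t4.dropLast ++ [([] : List Char)] else t4
    let s4 := t4.flatten
    let s5 := if s4.length == 0 then ['a'] else s4
    let s6 := PySem.Chars.slice s5 none (some 15)
    let s6 := if PySem.List.pyGet? s6 (-1) == some '.' then PySem.Chars.slice s6 none (some 14) else s6
    String.mk (padA s6)

-- ===== PORT B =====
def solution_alt (new_id : String) : String :=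
  let body := (PySem.Chars.lower new_id.toList).foldl
    (fun acc ch => if pvAllowed ch then
        (if ch == '.' && !acc.isEmpty && acc.getLast? == some '.' then acc else acc ++ [ch])
      else acc) []
  let s := PySem.Chars.stripChars body ['.']
  let s := if s.isEmpty then ['a'] else s
  let s := (List.dropWhile (fun c => c == '.') (PySem.Chars.slice s none (some 15)).reverse).reverse
  match s.getLast? with
  | some c => String.mk (s ++ List.replicate (3 - s.length) c)
  | none => ""

-- ===== PRECONDITION & SPEC =====
-- Pre_ excludes exactly the inputs on which A raises IndexError (step 4 indexes tmp_list[0] of an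
-- empty list): those whose lowercased form contains no allowed character.
def Pre_solution (new_id : String) : Prop :=
  (PySem.Chars.lower new_id.toList).any pvAllowed = true
instance (new_id : String) : Decidable (Pre_solution new_id) := by unfold Pre_solution; infer_instance

def pvWitness_solution : String := "...=.M.U.S.T.."

-- On inputs whose lowercased form contains no allowed character A raises IndexError; B returns "aaa".
def Raises_solution (new_id : String) : Prop :=
  (PySem.Chars.lower new_id.toList).all (fun c => !pvAllowed c) = true
instance (new_id : String) : Decidable (Raises_solution new_id) := by unfold Raises_solution; infer_instance
def pvRaiseWitness_solution : String := "!?"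
def pvRaiseWitnessOut_solution : String := "aaa"

def Spec_solution (new_id : String) (out : String) : Prop := out = solution_alt new_id
instance (new_id : String) (out : String) : Decidable (Spec_solution new_id out) := by unfold Spec_solution; infer_instance

-- ===== CLAIM (what is proved, stated in full; the proofs are below) =====
def Claim_equal_solution : Prop := ∀ (new_id : String), Dom_solution new_id → Pre_solution new_id → Spec_solution new_id (solution new_id)
def Claim_raises_solution : Prop := (∀ (new_id : String), Dom_solution new_id → Raises_solution new_id → ¬ Pre_solution new_id) ∧ (Dom_solution (pvRaiseWitness_solution) ∧ Raises_solution (pvRaiseWitness_solution) ∧ solution_alt (pvRaiseWitness_solution) = pvRaiseWitnessOut_solution)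

-- ===== LEMMAS AND PROOFS =====
def collapse : Bool → List Char → List Char
  | _, [] => []
  | prev, c :: t =>
    if c = '.' then (if prev then collapse true t else c :: collapse true t)
    else c :: collapse false t

def fA : List (List Char) × Bool → Char → List (List Char) × Bool := fun p c =>
  if c == '.' && !p.2 then (p.1 ++ [[c]], true)
  else if c == '.' && p.2 then (p.1 ++ [([] : List Char)], true)
  else (p.1 ++ [[c]], false)

def fB : List Char → Char → List Char := fun acc ch =>
  if pvAllowed ch then
    (if ch == '.' && !acc.isEmpty && acc.getLast? == some '.' then acc else acc ++ [ch])
  else acc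

theorem step2_eq (l : List Char) :
    ((l.map (fun c => if pvAllowed c then [c] else [])).flatten) = l.filter pvAllowed := by
  induction l with
  | nil => rfl
  | cons a t ih => by_cases h : pvAllowed a <;> simp [h, ih]

theorem foldA_eq (l : List Char) (acc : List (List Char)) (flag : Bool) :
    ((l.foldl fA (acc, flag)).1).flatten = acc.flatten ++ collapse flag l := by
  induction l generalizing acc flag with
  | nil => simp [collapse]
  | cons c t ih =>
    rw [List.foldl_cons]
    by_cases hc : c = '.'
    · cases flag
      · have h1 : fA (acc, false) c = (acc ++ [[c]], true) := by simp [fA, hc]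
        rw [h1, ih]; simp [collapse, hc]
      · have h1 : fA (acc, true) c = (acc ++ [([] : List Char)], true) := by simp [fA, hc]
        rw [h1, ih]; simp [collapse, hc]
    · have h1 : fA (acc, flag) c = (acc ++ [[c]], false) := by
        simp [fA, hc]
      rw [h1, ih]; simp [collapse, hc]

theorem foldB_eq (l : List Char) (acc : List Char) :
    l.foldl fB acc = acc ++ collapse (acc.getLast? == some '.') (l.filter pvAllowed) := by
  induction l generalizing acc with
  | nil => simp [collapse]
  | cons c t ih =>
    rw [List.foldl_cons]
    by_cases ha : pvAllowed c
    · by_cases hc : c = '.'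
      · by_cases hl : acc.getLast? = some '.'
        · have hne : acc.isEmpty = false := by
            cases acc with
            | nil => simp at hl
            | cons _ _ => rfl
          have h1 : fB acc c = acc := by simp [fB, hc, hl, hne]
          rw [h1, ih]
          simp [hl, hc, collapse, show pvAllowed '.' = true from by decide]
        · have h1 : fB acc c = acc ++ [c] := by simp [fB, hc, hl, show pvAllowed '.' = true from by decide]
          rw [h1, ih]
          have h2 : (acc.getLast? == some '.') = false := by simpa using hl
          simp [h2, hc, collapse, show pvAllowed '.' = true from by decide]
      · have h1 : fB acc c = acc ++ [c] := by simp [fB, ha, hc]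
        rw [h1, ih]
        have h2 : ((acc ++ [c]).getLast? == some '.') = false := by
          simp [hc]
        simp [ha, collapse, hc, show (c == '.') = false from by simp [hc]]
    · have h1 : fB acc c = acc := by simp [fB, ha]
      rw [h1, ih]; simp [ha]

def Rdot : Char → Char → Prop := fun a b => ¬(a = '.' ∧ b = '.')

theorem collapse_head_true (l : List Char) : (collapse true l).head? ≠ some '.' := by
  induction l with
  | nil => simp [collapse]
  | cons c t ih =>
    by_cases hc : c = '.'
    · simpa [collapse, hc] using ih
    · simp [collapse, hc]

theorem collapse_chain (flag : Bool) (l : List Char) :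
    List.IsChain Rdot (collapse flag l) := by
  induction l generalizing flag with
  | nil => simp [collapse]
  | cons c t ih =>
    by_cases hc : c = '.'
    · cases flag
      · rw [show collapse false (c :: t) = c :: collapse true t by simp [collapse, hc]]
        rw [List.isChain_cons]
        exact ⟨fun b hb => fun ⟨_, hb'⟩ => collapse_head_true t (hb' ▸ hb), ih true⟩
      · simpa [collapse, hc] using ih true
    · rw [show collapse flag (c :: t) = c :: collapse false t by simp [collapse, hc]]
      rw [List.isChain_cons]
      exact ⟨fun b hb ⟨hc', _⟩ => hc hc', ih false⟩

theorem pyGet_neg_one (l : List Char) : PySem.List.pyGet? l (-1) = l.getLast? := by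
  cases l with
  | nil => rfl
  | cons a t =>
    simp [PySem.List.pyGet?, PySem.List.pyIdx?, List.getLast?_eq_getElem?]

theorem contains_dot (c : Char) : (List.contains ['.'] c) = (c == '.') := by
  show (c == '.' || List.contains [] c) = (c == '.')
  simp

theorem stripChars_eq (s : List Char) :
    PySem.Chars.stripChars s ['.'] =
      List.rdropWhile (fun c => c == '.') (List.dropWhile (fun c => c == '.') s) := by
  unfold PySem.Chars.stripChars List.rdropWhile
  have hp : (fun c => List.contains ['.'] c) = (fun c : Char => c == '.') := by
    funext c; exact contains_dot c
  rw [hp]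

theorem flatten_map_singleton (l : List Char) : (l.map fun c => [c]).flatten = l := by
  induction l with
  | nil => rfl
  | cons a t ih => simp [ih]

theorem trim_eq (c0 : Char) (rest : List Char) (hch : List.IsChain Rdot (c0 :: rest)) :
    (if ((if c0 == '.' then ([] : List Char) else [c0]) :: rest.map (fun c => [c])).getLast? == some ['.']
     then ((if c0 == '.' then ([] : List Char) else [c0]) :: rest.map (fun c => [c])).dropLast ++ [([] : List Char)]
     else (if c0 == '.' then ([] : List Char) else [c0]) :: rest.map (fun c => [c])).flatten
    = PySem.Chars.stripChars (c0 :: rest) ['.'] := by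
  rw [stripChars_eq]
  rcases List.eq_nil_or_concat rest with hr | ⟨r', z, hr⟩
  · subst hr
    by_cases hc0 : c0 = '.'
    · simp [hc0, List.rdropWhile]
    · have h1 : List.dropWhile (fun c => c == '.') [c0] = [c0] :=
        List.dropWhile_cons_of_neg (by simpa using hc0)
      have h2 : List.rdropWhile (fun c => c == '.') [c0] = [c0] := by
        rw [List.rdropWhile_eq_self_iff]
        intro hl
        simpa using hc0
      simp [hc0, h1, h2]
  · rw [List.concat_eq_append] at hr
    subst hr
    have htail : List.IsChain Rdot (r' ++ [z]) := hch.tail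
    have hF2 : z = '.' → ∀ x ∈ r'.getLast?, x ≠ '.' := by
      intro hz x hx
      have := (List.isChain_append.mp htail).2.2 x hx z (by simp)
      intro hx'; exact this ⟨hx', hz⟩
    have hF1 : c0 = '.' → ∀ b ∈ (r' ++ [z]).head?, b ≠ '.' := by
      intro hc0 b hb hb'
      exact (List.isChain_cons.mp hch).1 b hb ⟨hc0, hb'⟩
    simp only [List.map_append, List.map_cons, List.map_nil]
    have hsplit : ((if c0 == '.' then ([] : List Char) else [c0]) :: (r'.map (fun c => [c]) ++ [[z]]))
        = ((if c0 == '.' then ([] : List Char) else [c0]) :: r'.map (fun c => [c])) ++ [[z]] := by simp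
    by_cases hz : z = '.'
    · have hcond : (((if c0 == '.' then ([] : List Char) else [c0]) :: (r'.map (fun c => [c]) ++ [[z]])).getLast? == some ['.']) = true := by
        rw [hsplit, List.getLast?_concat, hz]; rfl
      rw [if_pos hcond, hsplit, List.dropLast_concat]
      by_cases hc0 : c0 = '.'
      · have hr'ne : r' ≠ [] := by
          intro h; subst h
          exact hF1 hc0 z (by simp) hz
        have hdw2 : List.dropWhile (fun c => c == '.') (r' ++ [z]) = r' ++ [z] := by
          cases r' with
          | nil => simp at hr'ne
          | cons a t =>
            exact List.dropWhile_cons_of_neg (by simpa using hF1 hc0 a (by simp))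
        have hdwc : List.dropWhile (fun c => c == '.') (c0 :: (r' ++ [z]))
            = List.dropWhile (fun c => c == '.') (r' ++ [z]) :=
          List.dropWhile_cons_of_pos (by simp [hc0])
        have hrd : List.rdropWhile (fun c => c == '.') r' = r' := by
          rw [List.rdropWhile_eq_self_iff]
          intro hl
          simpa using hF2 hz (r'.getLast hl) (by simp [List.getLast?_eq_getLast hl])
        rw [hdwc, hdw2, hz, List.rdropWhile_concat_pos _ _ _ (by simp), hrd]
        simp [hc0, flatten_map_singleton]
      · have hdw : List.dropWhile (fun c => c == '.') (c0 :: (r' ++ [z])) = c0 :: (r' ++ [z]) :=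
          List.dropWhile_cons_of_neg (by simpa using hc0)
        have hrd : List.rdropWhile (fun c => c == '.') (c0 :: r') = c0 :: r' := by
          rw [List.rdropWhile_eq_self_iff]
          intro hl
          cases r' with
          | nil => simpa using hc0
          | cons a t =>
            have hg : (c0 :: a :: t).getLast hl = (a :: t).getLast (by simp) := by
              rw [List.getLast_cons]
            rw [hg]
            simpa using hF2 hz ((a :: t).getLast (by simp)) (by simp [List.getLast?_eq_getLast])
        rw [hdw, hz]
        rw [show c0 :: (r' ++ ['.']) = (c0 :: r') ++ ['.'] by simp]
        rw [List.rdropWhile_concat_pos _ _ _ (by simp), hrd]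
        simp [hc0, flatten_map_singleton]
    · have hcond : (((if c0 == '.' then ([] : List Char) else [c0]) :: (r'.map (fun c => [c]) ++ [[z]])).getLast? == some ['.']) = false := by
        rw [hsplit, List.getLast?_concat]
        simp [hz]
      have hcond' : ¬ ((((if c0 == '.' then ([] : List Char) else [c0]) :: (r'.map (fun c => [c]) ++ [[z]])).getLast? == some ['.']) = true) := by
        rw [hcond]; simp
      rw [if_neg hcond']
      by_cases hc0 : c0 = '.'
      · have hdw2 : List.dropWhile (fun c => c == '.') (r' ++ [z]) = r' ++ [z] := by
          cases hrr : r' ++ [z] with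
          | nil => simp at hrr
          | cons a t =>
            exact List.dropWhile_cons_of_neg (by simpa using hF1 hc0 a (by simp [hrr]))
        have hdwc : List.dropWhile (fun c => c == '.') (c0 :: (r' ++ [z]))
            = List.dropWhile (fun c => c == '.') (r' ++ [z]) :=
          List.dropWhile_cons_of_pos (by simp [hc0])
        rw [hdwc, hdw2, List.rdropWhile_concat_neg _ _ _ (by simpa using hz)]
        simp [hc0, flatten_map_singleton]
      · have hdw : List.dropWhile (fun c => c == '.') (c0 :: (r' ++ [z])) = c0 :: (r' ++ [z]) :=
          List.dropWhile_cons_of_neg (by simpa using hc0)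
        rw [hdw]
        rw [show c0 :: (r' ++ [z]) = (c0 :: r') ++ [z] by simp]
        rw [List.rdropWhile_concat_neg _ _ _ (by simpa using hz)]
        simp [hc0, flatten_map_singleton]

theorem padA_eq (s : List Char) (c : Char) (h : s.getLast? = some c) :
    padA s = s ++ List.replicate (3 - s.length) c := by
  match s with
  | [] => simp at h
  | [a] =>
    simp at h
    subst h
    have h3 : padA [a, a, a] = [a, a, a] := by rw [padA]; simp
    have h2 : padA [a, a] = [a, a, a] := by rw [padA]; simp [h3]
    have h1 : padA [a] = [a, a, a] := by rw [padA]; simp [h2]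
    rw [h1]
    simp [List.replicate_succ]
  | [a, b] =>
    simp at h
    subst h
    have h3 : padA [a, b, b] = [a, b, b] := by rw [padA]; simp
    have h2 : padA [a, b] = [a, b, b] := by rw [padA]; simp [h3]
    rw [h2]
    simp [List.replicate_succ]
  | a :: b :: d :: t =>
    rw [padA]
    simp

theorem step6_eq (s : List Char) (hne : s ≠ []) (hlast : s.getLast? ≠ some '.')
    (hch : List.IsChain Rdot s) :
    (if PySem.List.pyGet? (s.take 15) (-1) == some '.' then (s.take 15).take 14 else s.take 15)
    = List.rdropWhile (fun c => c == '.') (s.take 15) := by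
  have hcht : List.IsChain Rdot (s.take 15) := hch.prefix (List.take_prefix _ _)
  rw [pyGet_neg_one]
  by_cases hgl : (s.take 15).getLast? = some '.'
  · have hlen : 15 < s.length := by
      by_contra hle
      rw [List.take_of_length_le (by omega : s.length ≤ 15)] at hgl
      exact hlast hgl
    have htne : s.take 15 ≠ [] := by
      rw [Ne, List.take_eq_nil_iff]
      simp [hne]
    have hlt : (s.take 15).length = 15 := by
      rw [List.length_take]; omega
    have hgl' : (s.take 15).getLast htne = '.' := by
      have := List.getLast?_eq_getLast htne
      rw [hgl] at this
      exact (Option.some_inj.mp this).symm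
    have hsplit : (s.take 15).dropLast ++ ['.'] = s.take 15 := by
      rw [← hgl']
      exact List.dropLast_append_getLast htne
    have hdl_last : ∀ hl, ((s.take 15).dropLast.getLast hl) ≠ '.' := by
      intro hl hcontra
      have hchsp : List.IsChain Rdot ((s.take 15).dropLast ++ ['.']) := by
        rw [hsplit]; exact hcht
      have := (List.isChain_append.mp hchsp).2.2 ((s.take 15).dropLast.getLast hl)
        (by simp [List.getLast?_eq_getLast hl]) '.' (by simp)
      exact this ⟨hcontra, rfl⟩
    have hrd : List.rdropWhile (fun c => c == '.') (s.take 15) = (s.take 15).dropLast := by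
      conv_lhs => rw [← hsplit]
      rw [List.rdropWhile_concat_pos _ _ _ (by simp)]
      exact List.rdropWhile_eq_self_iff.mpr (fun hl => by simpa using hdl_last hl)
    rw [if_pos (by rw [hgl]; rfl), hrd, List.dropLast_eq_take, hlt]
  · rw [if_neg (by simp [hgl])]
    refine (List.rdropWhile_eq_self_iff.mpr ?_).symm
    intro hl hcontra
    apply hgl
    rw [List.getLast?_eq_getLast hl]
    simpa using hcontra

theorem ending (s5 : List Char) (a : Char) (hhd : s5.head? = some a) (ha : a ≠ '.')
    (hlast : s5.getLast? ≠ some '.') (hch : List.IsChain Rdot s5) :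
    String.mk (padA (if PySem.List.pyGet? (PySem.Chars.slice s5 none (some 15)) (-1) == some '.'
        then PySem.Chars.slice (PySem.Chars.slice s5 none (some 15)) none (some 14)
        else PySem.Chars.slice s5 none (some 15))) =
    (match (List.dropWhile (fun c => c == '.') (PySem.Chars.slice s5 none (some 15)).reverse).reverse.getLast? with
    | some c => String.mk ((List.dropWhile (fun c => c == '.') (PySem.Chars.slice s5 none (some 15)).reverse).reverse
        ++ List.replicate (3 - (List.dropWhile (fun c => c == '.') (PySem.Chars.slice s5 none (some 15)).reverse).reverse.length) c)
    | none => "") := by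
  have hne : s5 ≠ [] := by
    intro h; rw [h] at hhd; simp at hhd
  have hslice : PySem.Chars.slice s5 none (some 15) = s5.take 15 := by
    rw [PySem.Chars.slice_eq_listSlice, PySem.List.slice_to _ (by norm_num)]
    simp
  rw [hslice]
  have hslice14 : PySem.Chars.slice (s5.take 15) none (some 14) = (s5.take 15).take 14 := by
    rw [PySem.Chars.slice_eq_listSlice, PySem.List.slice_to _ (by norm_num)]
    simp
  rw [hslice14]
  rw [show (List.dropWhile (fun c => c == '.') (s5.take 15).reverse).reverse
      = List.rdropWhile (fun c => c == '.') (s5.take 15) from rfl]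
  rw [step6_eq s5 hne hlast hch]
  have hrne : List.rdropWhile (fun c => c == '.') (s5.take 15) ≠ [] := by
    intro h
    rw [List.rdropWhile_eq_nil_iff] at h
    have hmem : a ∈ s5.take 15 := by
      cases s5 with
      | nil => simp at hhd
      | cons x t =>
        simp at hhd
        subst hhd
        simp
    have := h a hmem
    simp at this
    exact ha this
  rw [List.getLast?_eq_getLast hrne]
  exact congrArg String.mk (padA_eq _ _ (List.getLast?_eq_getLast hrne))

theorem main (new_id : String)
    (hpre : (PySem.Chars.lower new_id.toList).any pvAllowed = true) :
    solution new_id = solution_alt new_id := by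
  unfold solution solution_alt
  rw [show (fun (p : List (List Char) × Bool) c =>
      if c == '.' && !p.2 then (p.1 ++ [[c]], true)
      else if c == '.' && p.2 then (p.1 ++ [([] : List Char)], true)
      else (p.1 ++ [[c]], false)) = fA from rfl]
  rw [show (fun (acc : List Char) ch => if pvAllowed ch then
        (if ch == '.' && !acc.isEmpty && acc.getLast? == some '.' then acc else acc ++ [ch])
      else acc) = fB from rfl]
  simp only [step2_eq, foldA_eq, foldB_eq, List.flatten_nil, List.nil_append,
    List.getLast?_nil]
  rw [show ((none : Option Char) == some '.') = false from rfl]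
  have hf : List.filter pvAllowed (PySem.Chars.lower new_id.toList) ≠ [] := by
    rw [List.any_eq_true] at hpre
    obtain ⟨c, hc, hac⟩ := hpre
    intro hnil
    rw [List.filter_eq_nil_iff] at hnil
    exact hnil c hc hac
  obtain ⟨c0, rest, hs3⟩ : ∃ c0 rest,
      collapse false (List.filter pvAllowed (PySem.Chars.lower new_id.toList)) = c0 :: rest := by
    cases hfl : List.filter pvAllowed (PySem.Chars.lower new_id.toList) with
    | nil => exact absurd hfl hf
    | cons x xs =>
      by_cases hx : x = '.'
      · exact ⟨x, collapse true xs, by simp [collapse, hx]⟩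
      · exact ⟨x, collapse false xs, by simp [collapse, hx]⟩
  have hch3 : List.IsChain Rdot (c0 :: rest) := hs3 ▸ collapse_chain false _
  rw [hs3]
  dsimp only
  rw [trim_eq c0 rest hch3]
  rw [stripChars_eq]
  have hchst : List.IsChain Rdot
      (List.rdropWhile (fun c => c == '.') (List.dropWhile (fun c => c == '.') (c0 :: rest))) :=
    (hch3.suffix (List.dropWhile_suffix _)).prefix (List.rdropWhile_prefix _ _)
  by_cases hstnil : List.rdropWhile (fun c => c == '.') (List.dropWhile (fun c => c == '.') (c0 :: rest)) = []
  · have hA : (if ((List.rdropWhile (fun c => c == '.') (List.dropWhile (fun c => c == '.') (c0 :: rest))).length == 0) = true then ['a'] else List.rdropWhile (fun c => c == '.') (List.dropWhile (fun c => c == '.') (c0 :: rest))) = ['a'] := by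
      rw [hstnil]; rfl
    have hB : (if (List.rdropWhile (fun c => c == '.') (List.dropWhile (fun c => c == '.') (c0 :: rest))).isEmpty = true then ['a'] else List.rdropWhile (fun c => c == '.') (List.dropWhile (fun c => c == '.') (c0 :: rest))) = ['a'] := by
      rw [hstnil]; rfl
    rw [hA, hB]
    exact ending ['a'] 'a' rfl (by decide) (by decide) (by simp)
  · have hA : (if ((List.rdropWhile (fun c => c == '.') (List.dropWhile (fun c => c == '.') (c0 :: rest))).length == 0) = true then ['a'] else List.rdropWhile (fun c => c == '.') (List.dropWhile (fun c => c == '.') (c0 :: rest))) = List.rdropWhile (fun c => c == '.') (List.dropWhile (fun c => c == '.') (c0 :: rest)) := by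
      have h : ((List.rdropWhile (fun c => c == '.') (List.dropWhile (fun c => c == '.') (c0 :: rest))).length == 0) = false := by
        simp [List.length_eq_zero_iff, hstnil]
      rw [h]; rfl
    have hB : (if (List.rdropWhile (fun c => c == '.') (List.dropWhile (fun c => c == '.') (c0 :: rest))).isEmpty = true then ['a'] else List.rdropWhile (fun c => c == '.') (List.dropWhile (fun c => c == '.') (c0 :: rest))) = List.rdropWhile (fun c => c == '.') (List.dropWhile (fun c => c == '.') (c0 :: rest)) := by
      have h : (List.rdropWhile (fun c => c == '.') (List.dropWhile (fun c => c == '.') (c0 :: rest))).isEmpty = false := by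
        simp [hstnil]
      rw [h]; rfl
    rw [hA, hB]
    obtain ⟨a, st', hsta⟩ := List.exists_cons_of_ne_nil hstnil
    have hhd : (List.rdropWhile (fun c => c == '.') (List.dropWhile (fun c => c == '.') (c0 :: rest))).head? = some a := by
      rw [hsta]; rfl
    have ha : a ≠ '.' := by
      obtain ⟨t, htt⟩ := List.rdropWhile_prefix (fun c => c == '.') (List.dropWhile (fun c => c == '.') (c0 :: rest))
      rw [hsta] at htt
      have hda : (List.dropWhile (fun c => c == '.') (c0 :: rest)).head? = some a := by
        rw [← htt]; rfl
      have := List.head?_dropWhile_not (fun c => c == '.') (c0 :: rest)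
      rw [hda] at this
      simpa using this
    have hlastst : (List.rdropWhile (fun c => c == '.') (List.dropWhile (fun c => c == '.') (c0 :: rest))).getLast? ≠ some '.' := by
      rw [List.getLast?_eq_getLast hstnil]
      intro hcontra
      exact List.rdropWhile_last_not (fun c => c == '.') _ hstnil
        (by simpa using Option.some_inj.mp hcontra)
    exact ending _ a hhd ha hlastst hchst

-- ===== VERDICT (by name: the statement is the Claim_ definition above) =====
theorem solution_spec : Claim_equal_solution := by
  intro new_id _ hpre
  exact main new_id hpre

@[simp]
theorem solution_raises : Claim_raises_solution := by
  unfold Claim_raises_solution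
  exact ⟨fun s _ hr hp => by
    unfold Raises_solution at hr
    unfold Pre_solution at hp
    simp [List.all_eq_true, List.any_eq_true] at hr hp
    obtain ⟨c, hc, hac⟩ := hp
    exact absurd hac (by simpa using hr c hc), by decide⟩
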